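-- pv_equiv track=rewrite | github.com/jclements3/HarpHymnal | renderers/lilypond.py | parse_key_root
-- ===== SOURCE A (Python) =====
-- PITCH_CLASS = {'C': 0, 'D': 2, 'E': 4, 'F': 5, 'G': 7, 'A': 9, 'B': 11}
--
-- def parse_key_root(key_root_str: str) -> int:
--     """``'Bb'/'B-' → 10``, ``'F#' → 6``, ``'G' → 7``."""
--     s = key_root_str.strip() if key_root_str else ''
--     if not s:
--         return 0
--     base = PITCH_CLASS[s[0].upper()]
--     for ch in s[1:]:
--         if ch == '#':
--             base = (base + 1) % 12
--         elif ch in ('-', 'b'):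
--             base = (base - 1) % 12
--     return base
-- ===== SOURCE B (Python) =====
-- PITCH_CLASS = {'C': 0, 'D': 2, 'E': 4, 'F': 5, 'G': 7, 'A': 9, 'B': 11}
--
-- def parse_key_root(key_root_str: str) -> int:
--     """``'Bb'/'B-' → 10``, ``'F#' → 6``, ``'G' → 7``."""
--     s = key_root_str.strip() if key_root_str else ''
--     if not s:
--         return 0
--     rest = s[1:]
--     offset = rest.count('#') - rest.count('b') - rest.count('-')
--     return (PITCH_CLASS[s[0].upper()] + offset) % 12
-- ===== Notes on version B (the rewrite author's own statement) =====
-- stated objective: faster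
-- what changed: Replaces the stateful per-character accumulator loop with a running modulo by a closed-form net accidental offset computed from three str.count calls and a single final % 12.
import Mathlib
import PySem

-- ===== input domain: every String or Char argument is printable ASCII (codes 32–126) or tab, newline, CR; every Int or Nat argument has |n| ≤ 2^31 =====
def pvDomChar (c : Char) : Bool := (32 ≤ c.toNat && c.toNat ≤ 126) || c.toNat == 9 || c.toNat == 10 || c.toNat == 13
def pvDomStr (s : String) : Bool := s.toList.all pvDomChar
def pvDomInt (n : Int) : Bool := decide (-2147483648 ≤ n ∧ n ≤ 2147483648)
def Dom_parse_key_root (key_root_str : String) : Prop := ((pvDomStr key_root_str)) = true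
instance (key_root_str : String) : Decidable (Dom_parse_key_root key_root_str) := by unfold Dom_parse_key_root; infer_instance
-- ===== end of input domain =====

-- B replaces A's stateful accumulator loop by a closed-form offset from character counts (objective: simpler).

-- ===== PORT A =====
def PITCH_CLASS : PySem.Dict Char Int :=
  PySem.Dict.ofList [('C', 0), ('D', 2), ('E', 4), ('F', 5), ('G', 7), ('A', 9), ('B', 11)]

def parse_key_root (key_root_str : String) : Int :=
  let s := (if key_root_str ≠ "" then PySem.Str.strip key_root_str else "").toList
  match s with
  | [] => 0
  | c :: rest =>
    -- KeyError when the first letter is not a pitch name is excluded by Pre_; getD 0 is unreachable there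
    let base := (PITCH_CLASS.get? (PySem.Chars.upperChar c)).getD 0
    rest.foldl (fun base ch =>
      if ch = '#' then PySem.Int.mod (base + 1) 12
      else if ch = '-' ∨ ch = 'b' then PySem.Int.mod (base - 1) 12
      else base) base

-- ===== PORT B =====
def parse_key_root_alt (key_root_str : String) : Int :=
  let s := (if key_root_str ≠ "" then PySem.Str.strip key_root_str else "").toList
  match s with
  | [] => 0
  | c :: rest =>
    let offset : Int := (rest.count '#' : Int) - (rest.count 'b' : Int) - (rest.count '-' : Int)
    PySem.Int.mod ((PITCH_CLASS.get? (PySem.Chars.upperChar c)).getD 0 + offset) 12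

-- ===== PRECONDITION & SPEC =====
-- Pre_ excludes exactly the inputs whose stripped first character is not (case-insensitively) one of
-- A..G: there Python A raises KeyError (and B raises the same KeyError).
def Pre_parse_key_root (key_root_str : String) : Prop :=
  PySem.Chars.upperChar
      (((if key_root_str ≠ "" then PySem.Str.strip key_root_str else "").toList).headD 'C')
    ∈ ['C', 'D', 'E', 'F', 'G', 'A', 'B']
instance (key_root_str : String) : Decidable (Pre_parse_key_root key_root_str) := by
  unfold Pre_parse_key_root; infer_instance

def pvWitness_parse_key_root : String := "Bb"

def Spec_parse_key_root (key_root_str : String) (out : Int) : Prop := out = parse_key_root_alt key_root_str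
instance (key_root_str : String) (out : Int) : Decidable (Spec_parse_key_root key_root_str out) := by unfold Spec_parse_key_root; infer_instance

-- ===== CLAIM (what is proved, stated in full; the proofs are below) =====
def Claim_equal_parse_key_root : Prop := ∀ (key_root_str : String), Dom_parse_key_root key_root_str → Pre_parse_key_root key_root_str → Spec_parse_key_root key_root_str (parse_key_root key_root_str)

-- ===== LEMMAS AND PROOFS =====

/-- A's accumulator loop, started at a value already reduced mod 12, computes the
net-offset-then-mod closed form. -/
theorem loop_eq_offset (rest : List Char) (b : Int) :
    rest.foldl (fun base ch =>
      if ch = '#' then PySem.Int.mod (base + 1) 12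
      else if ch = '-' ∨ ch = 'b' then PySem.Int.mod (base - 1) 12
      else base) (PySem.Int.mod b 12)
    = PySem.Int.mod
        (b + ((rest.count '#' : Int) - (rest.count 'b' : Int) - (rest.count '-' : Int))) 12 := by
  induction rest generalizing b with
  | nil => simp
  | cons ch rest ih =>
    simp only [List.foldl_cons]
    by_cases h1 : ch = '#'
    · rw [show PySem.Int.mod (PySem.Int.mod b 12 + 1) 12 = PySem.Int.mod (b + 1) 12 by simp]
      rw [if_pos h1, ih]
      subst h1
      simp
      omega
    · by_cases h2 : ch = '-' ∨ ch = 'b'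
      · rw [if_neg h1, if_pos h2]
        rw [show PySem.Int.mod (PySem.Int.mod b 12 - 1) 12 = PySem.Int.mod (b - 1) 12 by simp]
        rw [ih]
        rcases h2 with h2 | h2 <;> subst h2 <;> simp <;> omega
      · rw [if_neg h1, if_neg h2, ih]
        rw [not_or] at h2
        simp [h1, h2.1, h2.2]

-- ===== VERDICT (by name: the statement is the Claim_ definition above) =====
theorem parse_key_root_spec : Claim_equal_parse_key_root := by
  intro key_root_str _hdom hpre
  unfold Spec_parse_key_root parse_key_root parse_key_root_alt
  unfold Pre_parse_key_root at hpre
  set s := (if key_root_str ≠ "" then PySem.Str.strip key_root_str else "").toList with hs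
  clear_value s
  match s with
  | [] => rfl
  | c :: rest =>
    simp only [List.headD] at hpre
    dsimp only
    generalize PySem.Chars.upperChar c = u at hpre ⊢
    have key : ∀ b : Int, PySem.Int.mod b 12 = b →
        rest.foldl (fun base ch =>
          if ch = '#' then PySem.Int.mod (base + 1) 12
          else if ch = '-' ∨ ch = 'b' then PySem.Int.mod (base - 1) 12
          else base) b
        = PySem.Int.mod
            (b + ((rest.count '#' : Int) - (rest.count 'b' : Int) - (rest.count '-' : Int))) 12 := by
      intro b hb
      conv_lhs => rw [← hb]
      exact loop_eq_offset rest b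
    fin_cases hpre <;> exact key _ (by decide)
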